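-- pv_equiv track=rewrite | github.com/CarlosGSilva320/Algoritimo-Exercicios | Revisão P1/Ex4.py | bilheteria_por_diretor
-- ===== SOURCE A (Python) =====
-- filmes = [
--     {
--         "titulo": "Inception",
--         "diretor": "Chistopher Nolan",
--         "bilheteria": 830,
--         "avaliacoes": [9, 10, 8, 9, 10]
--     },
--     {
--         "titulo": "Avengers Endgame",
--         "diretor": "Anthony Russo",
--         "bilheteria": 2797,
--         "avaliacoes": [9, 9, 10, 10, 9]
--     },
--     {
--         "titulo": "The Dark Knight",
--         "diretor": "Chistopher Nolan",
--         "bilheteria": 1005,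
--         "avaliacoes": [10, 10, 9, 10, 10]
--     },
--     {
--         "titulo": "Jurassic Park",
--         "diretor": "Steven Spielberg",
--         "bilheteria":1029,
--         "avaliacoes": [8, 9, 9, 8, 9]
--     }
-- ]
--
-- def bilheteria_por_diretor(diretor):
--
--     lista ={}
--     bilheteria = 0
--     for f in filmes:
--         if diretor == f["diretor"]:
--             bilheteria += f["bilheteria"]
--             lista = {diretor : bilheteria}
--     return lista
-- ===== SOURCE B (Python) =====
-- filmes = [
--     {
--         "titulo": "Inception",
--         "diretor": "Chistopher Nolan",
--         "bilheteria": 830,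
--         "avaliacoes": [9, 10, 8, 9, 10]
--     },
--     {
--         "titulo": "Avengers Endgame",
--         "diretor": "Anthony Russo",
--         "bilheteria": 2797,
--         "avaliacoes": [9, 9, 10, 10, 9]
--     },
--     {
--         "titulo": "The Dark Knight",
--         "diretor": "Chistopher Nolan",
--         "bilheteria": 1005,
--         "avaliacoes": [10, 10, 9, 10, 10]
--     },
--     {
--         "titulo": "Jurassic Park",
--         "diretor": "Steven Spielberg",
--         "bilheteria": 1029,
--         "avaliacoes": [8, 9, 9, 8, 9]
--     }
-- ]
--
-- def bilheteria_por_diretor(diretor):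
--     totais = {}
--     for f in filmes:
--         totais[f["diretor"]] = totais.get(f["diretor"], 0) + f["bilheteria"]
--     return {diretor: totais[diretor]} if diretor in totais else {}
-- ===== Notes on version B (the rewrite author's own statement) =====
-- stated objective: alternative
-- what changed: B replaces A's filter-and-accumulate pass (running sum plus a dict rebuilt on each match) with a group-by: it builds one totals table keyed by every director in a single pass and then answers with a single membership test and lookup, naturally returning {} when the director is absent.
import Mathlib
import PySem

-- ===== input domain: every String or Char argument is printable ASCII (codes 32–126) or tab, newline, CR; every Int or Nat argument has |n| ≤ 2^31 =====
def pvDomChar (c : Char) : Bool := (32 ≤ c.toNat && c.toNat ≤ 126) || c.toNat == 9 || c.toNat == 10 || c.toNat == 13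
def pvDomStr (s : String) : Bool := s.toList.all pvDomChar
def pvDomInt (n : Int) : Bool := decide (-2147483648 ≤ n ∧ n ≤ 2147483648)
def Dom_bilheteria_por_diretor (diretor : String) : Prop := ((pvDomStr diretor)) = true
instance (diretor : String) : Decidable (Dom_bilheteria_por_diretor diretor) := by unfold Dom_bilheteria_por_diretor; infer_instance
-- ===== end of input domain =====

-- ===== PORT A =====
-- Module data: (titulo, diretor, bilheteria, avaliacoes) for each film.
def pvFilmes : List (String × String × Int × List Int) :=
  [("Inception", "Chistopher Nolan", 830, [9, 10, 8, 9, 10]),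
   ("Avengers Endgame", "Anthony Russo", 2797, [9, 9, 10, 10, 9]),
   ("The Dark Knight", "Chistopher Nolan", 1005, [10, 10, 9, 10, 10]),
   ("Jurassic Park", "Steven Spielberg", 1029, [8, 9, 9, 8, 9])]

-- A: running sum for the requested director; lista rebuilt on every match.
def bilheteria_por_diretor (diretor : String) : List (String × Int) :=
  (pvFilmes.foldl
    (fun (st : List (String × Int) × Int) f =>
      if diretor == f.2.1 then
        ([(diretor, st.2 + f.2.2.1)], st.2 + f.2.2.1)
      else st)
    ([], 0)).1

-- ===== PORT B =====
-- B: group-by pass building a totals table for every director, then one lookup.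
def bilheteria_por_diretor_alt (diretor : String) : List (String × Int) :=
  let totais : PySem.Dict String Int :=
    pvFilmes.foldl (fun d f => d.insert f.2.1 (d.getD f.2.1 0 + f.2.2.1)) PySem.Dict.empty
  if totais.contains diretor then [(diretor, totais.getD diretor 0)] else []

-- ===== PRECONDITION & SPEC =====
def Spec_bilheteria_por_diretor (diretor : String) (out : List (String × Int)) : Prop := out = bilheteria_por_diretor_alt diretor
instance (diretor : String) (out : List (String × Int)) : Decidable (Spec_bilheteria_por_diretor diretor out) := by unfold Spec_bilheteria_por_diretor; infer_instance

-- ===== CLAIM (what is proved, stated in full; the proofs are below) =====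
def Claim_equal_bilheteria_por_diretor : Prop := ∀ (diretor : String), Dom_bilheteria_por_diretor diretor → Spec_bilheteria_por_diretor diretor (bilheteria_por_diretor diretor)

-- ===== LEMMAS AND PROOFS =====

-- ===== VERDICT (by name: the statement is the Claim_ definition above) =====
theorem bilheteria_por_diretor_spec : Claim_equal_bilheteria_por_diretor := by
  intro diretor _
  unfold Spec_bilheteria_por_diretor
  by_cases h1 : diretor = "Chistopher Nolan"
  · subst h1; decide
  by_cases h2 : diretor = "Anthony Russo"
  · subst h2; decide
  by_cases h3 : diretor = "Steven Spielberg"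
  · subst h3; decide
  simp [bilheteria_por_diretor, bilheteria_por_diretor_alt, pvFilmes, List.foldl,
        PySem.Dict.insert, PySem.Dict.empty, PySem.Dict.getD, PySem.Dict.contains,
        h1, h2, h3]
  exact ⟨fun e => h1 e.symm, fun e => h2 e.symm, fun e => h3 e.symm⟩
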